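-- pv_equiv track=rewrite | github.com/Alexmv235/codebase | TEC/R_China/ExamenPract.py | aux
-- ===== SOURCE A (Python) =====
-- def aux(matrix,svmax,imax,i,j,result):
--     if j==len(matrix[0]):
--         return (maxT(matrix,imax,0,[]),svmax)
--     else:
--         if i==len(matrix):
--             if result>svmax:
--                 return aux(matrix,result,j,0,j+1,1)
--             else:
--                 return aux(matrix,svmax,imax,0,j+1,1)
--         else:
--             return aux(matrix,svmax,imax,i+1,j,result*matrix[i][j])
--
-- def maxT(matrix,jmax,i,result):
--     if i==len(matrix):
--             return result
--     else:
--             return maxT(matrix,jmax,i+1,result+[matrix[i][jmax]])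
-- ===== SOURCE B (Python) =====
-- def aux(matrix, svmax, imax, i, j, result):
--     # Return value only; same column-product maximum, computed with explicit
--     # loops per column instead of one interleaved recursion.
--     nrows, ncols = len(matrix), len(matrix[0])
--     best, besti = svmax, imax
--     for col in range(j, ncols):
--         p = result if col == j else 1
--         lo = i if col == j else 0
--         for r in range(lo, nrows):
--             p *= matrix[r][col]
--         if p > best:
--             best, besti = p, col
--     return ([row[besti] for row in matrix], best)
-- ===== Notes on version B (the rewrite author's own statement) =====
-- stated objective: simpler
-- what changed: Replaced A's single interleaved tail recursion over a 6-tuple state (and the recursive column-extractor maxT) by two plain nested for-loops (one per column, one per row) plus a list comprehension for the returned column.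
-- outside the precondition, e.g. on aux([[2, 3], [4, 5]], -100, 5, 0, 0, 1): A returns ([3, 5], 15), B returns ([3, 5], 15); on aux([[1, 2]], -5, 0, 1, -3, 0): A returns ([2], 2), B returns ([2], 2)
import Mathlib
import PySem

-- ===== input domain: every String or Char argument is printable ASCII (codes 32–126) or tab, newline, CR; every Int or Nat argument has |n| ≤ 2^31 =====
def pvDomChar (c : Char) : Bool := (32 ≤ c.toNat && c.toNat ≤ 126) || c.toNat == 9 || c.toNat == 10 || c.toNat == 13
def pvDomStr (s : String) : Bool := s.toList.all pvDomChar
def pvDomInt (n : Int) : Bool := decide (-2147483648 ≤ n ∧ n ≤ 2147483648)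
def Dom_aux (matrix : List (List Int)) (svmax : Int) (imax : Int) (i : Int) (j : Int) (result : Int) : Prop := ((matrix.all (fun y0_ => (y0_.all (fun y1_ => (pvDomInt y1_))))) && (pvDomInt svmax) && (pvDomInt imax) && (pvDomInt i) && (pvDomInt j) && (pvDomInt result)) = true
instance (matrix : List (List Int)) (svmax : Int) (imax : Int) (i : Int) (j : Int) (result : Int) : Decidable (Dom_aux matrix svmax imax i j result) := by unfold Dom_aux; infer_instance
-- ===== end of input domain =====

-- B replaces A's interleaved tail recursion (and recursive maxT) with two nested
-- loops over columns and rows plus a comprehension for the result column (return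
-- value only; neither version mutates its arguments).


-- ===== PORT A =====
-- matrix[r][c] (getD only as a totality guard: inside Pre_ the indices are in range)
def cellA (matrix : List (List Int)) (r c : Int) : Int :=
  (PySem.List.pyGet? ((PySem.List.pyGet? matrix r).getD []) c).getD 0

-- maxT, transliterated; fuel is a totality guard for the Int counter i
def maxTgo : Nat → List (List Int) → Int → Int → List Int → List Int
  | 0, _, _, _, result => result
  | f+1, matrix, jmax, i, result =>
    if i = (matrix.length : Int) then result
    else maxTgo f matrix jmax (i + 1) (result ++ [cellA matrix i jmax])

def maxT (matrix : List (List Int)) (jmax i : Int) (result : List Int) : List Int :=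
  maxTgo (matrix.length + 1) matrix jmax i result

-- fuel that exactly covers A's recursion depth inside Pre_aux
def fuelA (matrix : List (List Int)) (i j : Int) : Nat :=
  (((matrix.headD []).length : Int) - j).toNat * (matrix.length + 1)
    + ((matrix.length : Int) - i).toNat + 1

def auxgo : Nat → List (List Int) → Int → Int → Int → Int → Int → List Int × Int
  | 0, _, _, _, _, _, _ => ([], 0)
  | f+1, matrix, svmax, imax, i, j, result =>
    if j = (((matrix.headD []).length : Int)) then (maxT matrix imax 0 [], svmax)
    else
      if i = (matrix.length : Int) then
        if result > svmax then auxgo f matrix result j 0 (j + 1) 1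
        else auxgo f matrix svmax imax 0 (j + 1) 1
      else auxgo f matrix svmax imax (i + 1) j (result * cellA matrix i j)

def aux (matrix : List (List Int)) (svmax : Int) (imax : Int) (i : Int) (j : Int) (result : Int) : List Int × Int :=
  auxgo (fuelA matrix i j) matrix svmax imax i j result

-- ===== PORT B =====
-- one column's running state update: product of rows lo..nrows-1 times p0, strict max
def colStep (matrix : List (List Int)) (i j result : Int) (bb : Int × Int) (col : Int) : Int × Int :=
  let p0 := if col = j then result else 1
  let lo := if col = j then i else 0
  let p := (PySem.List.pyRange lo (matrix.length : Int) 1).foldl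
      (fun acc r => acc * cellA matrix r col) p0
  if p > bb.1 then (p, col) else bb

-- the state (best, besti) after B's outer for-loop
def bbOf (matrix : List (List Int)) (svmax imax i j result : Int) : Int × Int :=
  (PySem.List.pyRange j ((matrix.headD []).length : Int) 1).foldl
    (colStep matrix i j result) (svmax, imax)

def aux_alt (matrix : List (List Int)) (svmax : Int) (imax : Int) (i : Int) (j : Int) (result : Int) : List Int × Int :=
  (matrix.map (fun row => (PySem.List.pyGet? row (bbOf matrix svmax imax i j result).2).getD 0),
   (bbOf matrix svmax imax i j result).1)

-- ===== PRECONDITION & SPEC =====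
-- Pre_aux = the inputs on which Python A returns without an exception, minus two
-- defensible conservative corners on which A also returns (B returns the same value
-- there in Python; see the cited excluded examples): (a) a starting imax that is an
-- invalid index for some row but happens to be beaten during the run (whether it is
-- beaten depends on the computed products, which a closed-form precondition may not
-- re-simulate), and (b) start states (i already at the bottom row with an extreme
-- negative j) where A skips cells that Pre_aux conservatively requires to be in
-- range: matrix nonempty, imax a valid (possibly negative, Python-style) index into
-- every row, and either j already equals the column count or (i, j) are in-range
-- (possibly negative, Python-style) counters with every scanned cell in range.
def Pre_aux (matrix : List (List Int)) (svmax : Int) (imax : Int) (i : Int) (j : Int) (result : Int) : Prop :=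
  matrix ≠ [] ∧
  (∀ row ∈ matrix, -(row.length : Int) ≤ imax ∧ imax < (row.length : Int)) ∧
  (j = ((matrix.headD []).length : Int) ∨
    (j < ((matrix.headD []).length : Int) ∧
     -((matrix.length : Int)) ≤ i ∧ i ≤ (matrix.length : Int) ∧
     (∀ row ∈ matrix, ((matrix.headD []).length : Int) ≤ (row.length : Int) ∧ -(row.length : Int) ≤ j)) ∨
    (j < ((matrix.headD []).length : Int) ∧ i = (matrix.length : Int) ∧ result ≤ svmax ∧
     (∀ row ∈ matrix, ((matrix.headD []).length : Int) ≤ (row.length : Int) ∧ -(row.length : Int) ≤ j + 1)))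
instance (matrix : List (List Int)) (svmax : Int) (imax : Int) (i : Int) (j : Int) (result : Int) : Decidable (Pre_aux matrix svmax imax i j result) := by unfold Pre_aux; infer_instance

def pvWitness_aux : List (List Int) × Int × Int × Int × Int × Int := ([[1, 2], [3, 4]], 0, 0, 0, 0, 1)

def Spec_aux (matrix : List (List Int)) (svmax : Int) (imax : Int) (i : Int) (j : Int) (result : Int) (out : List Int × Int) : Prop := out = aux_alt matrix svmax imax i j result
instance (matrix : List (List Int)) (svmax : Int) (imax : Int) (i : Int) (j : Int) (result : Int) (out : List Int × Int) : Decidable (Spec_aux matrix svmax imax i j result out) := by unfold Spec_aux; infer_instance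

-- ===== CLAIM (what is proved, stated in full; the proofs are below) =====
def Claim_equal_aux : Prop := ∀ (matrix : List (List Int)) (svmax : Int) (imax : Int) (i : Int) (j : Int) (result : Int), Dom_aux matrix svmax imax i j result → Pre_aux matrix svmax imax i j result → Spec_aux matrix svmax imax i j result (aux matrix svmax imax i j result)

-- ===== LEMMAS AND PROOFS =====

-- one-step unfolding of auxgo (definitional)
theorem auxgo_succ (f : Nat) (matrix : List (List Int)) (svmax imax i j result : Int) :
    auxgo (f + 1) matrix svmax imax i j result
      = if j = (((matrix.headD []).length : Int)) then (maxT matrix imax 0 [], svmax)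
        else
          if i = (matrix.length : Int) then
            if result > svmax then auxgo f matrix result j 0 (j + 1) 1
            else auxgo f matrix svmax imax 0 (j + 1) 1
          else auxgo f matrix svmax imax (i + 1) j (result * cellA matrix i j) := rfl

-- maxTgo builds acc ++ the jmax-entries of the rows from i on
theorem maxTgo_eq (matrix : List (List Int)) (jmax : Int) :
    ∀ (f : Nat) (i : Nat) (acc : List Int), matrix.length - i + 1 ≤ f → i ≤ matrix.length →
      maxTgo f matrix jmax (i : Int) acc
        = acc ++ (matrix.drop i).map (fun row => (PySem.List.pyGet? row jmax).getD 0) := by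
  intro f
  induction f with
  | zero => intro i acc hf _; omega
  | succ f ih =>
    intro i acc hf hi
    by_cases hlen : (i : Int) = (matrix.length : Int)
    · have : i = matrix.length := by exact_mod_cast hlen
      simp [maxTgo, this]
    · have hlt : i < matrix.length := by omega
      have hdrop : matrix.drop i = matrix[i] :: matrix.drop (i + 1) :=
        List.drop_eq_getElem_cons hlt
      have hcell : cellA matrix (i : Int) jmax
          = (PySem.List.pyGet? matrix[i] jmax).getD 0 := by
        simp [cellA, hlt]
      have hstep : maxTgo (f + 1) matrix jmax (i : Int) acc
          = maxTgo f matrix jmax ((i : Int) + 1) (acc ++ [cellA matrix (i : Int) jmax]) := by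
        simp [maxTgo, hlen]
      have hcast : ((i : Int) + 1) = ((i + 1 : Nat) : Int) := by push_cast; ring
      rw [hstep, hcast, ih (i + 1) _ (by omega) (by omega), hdrop]
      have hlt' : i < (matrix.map (fun row => (PySem.List.pyGet? row jmax).getD 0)).length := by
        simpa using hlt
      simp [hcell, List.drop_eq_getElem_cons hlt']

-- folding colStep over columns strictly beyond j does not depend on (i, result)
theorem colStep_congr (matrix : List (List Int)) (i j result : Int) (j' : Int)
    (hj : j < j') :
    ∀ (bb : Int × Int),
      (PySem.List.pyRange j' ((matrix.headD []).length : Int) 1).foldl (colStep matrix i j result) bb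
        = (PySem.List.pyRange j' ((matrix.headD []).length : Int) 1).foldl (colStep matrix 0 j' 1) bb := by
  intro bb
  apply PySem.List.foldl_congr_mem
  intro acc col hcol
  have hge : j' ≤ col := ((PySem.List.mem_pyRange_one).1 hcol).1
  have h1 : ¬ col = j := by omega
  by_cases h2 : col = j'
  · have h1' : ¬ j' = j := by omega
    simp [colStep, h2, h1']
  · simp [colStep, h1, h2]

-- B's loop state absorbs one multiplication step of the current column
theorem bb_step (matrix : List (List Int)) (svmax imax i j result : Int)
    (hi : i < (matrix.length : Int)) :
    bbOf matrix svmax imax i j result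
      = bbOf matrix svmax imax (i + 1) j (result * cellA matrix i j) := by
  unfold bbOf
  apply PySem.List.foldl_congr_mem
  intro acc col hcol
  by_cases hc : col = j
  · have hrange : PySem.List.pyRange i (matrix.length : Int) 1
        = i :: PySem.List.pyRange (i + 1) (matrix.length : Int) 1 :=
      PySem.List.pyRange_one_cons hi
    simp [colStep, hc, hrange]
  · simp [colStep, hc]

-- B's loop state at the bottom of a column: compare, then restart at the next column
theorem bb_colend (matrix : List (List Int)) (svmax imax j result : Int)
    (hj : j < ((matrix.headD []).length : Int)) :
    bbOf matrix svmax imax (matrix.length : Int) j result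
      = (if result > svmax then bbOf matrix result j 0 (j + 1) 1
         else bbOf matrix svmax imax 0 (j + 1) 1) := by
  unfold bbOf
  rw [PySem.List.pyRange_one_cons hj]
  have hfirst : colStep matrix (matrix.length : Int) j result (svmax, imax) j
      = (if result > svmax then (result, j) else (svmax, imax)) := by
    simp [colStep, PySem.List.pyRange_one_eq_nil le_rfl]
  rw [List.foldl_cons, hfirst,
    colStep_congr matrix (matrix.length : Int) j result (j + 1) (by omega)]
  split_ifs <;> rfl

-- aux_alt when j has reached the column count
theorem alt_done (matrix : List (List Int)) (svmax imax i result : Int) :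
    aux_alt matrix svmax imax i ((matrix.headD []).length : Int) result
      = (matrix.map (fun row => (PySem.List.pyGet? row imax).getD 0), svmax) := by
  simp [aux_alt, bbOf, PySem.List.pyRange_one_eq_nil le_rfl]

-- main simulation: with enough fuel, A's recursion computes aux_alt
theorem auxgo_eq (matrix : List (List Int)) :
    ∀ (f : Nat) (svmax imax i j result : Int),
      (j = ((matrix.headD []).length : Int) ∨
        (j < ((matrix.headD []).length : Int) ∧ i ≤ (matrix.length : Int))) →
      fuelA matrix i j ≤ f →
      auxgo f matrix svmax imax i j result = aux_alt matrix svmax imax i j result := by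
  intro f
  induction f with
  | zero => intro svmax imax i j result _ hf; simp [fuelA] at hf
  | succ f ih =>
    intro svmax imax i j result hpre hf
    by_cases hj : j = ((matrix.headD []).length : Int)
    · subst hj
      rw [alt_done, auxgo_succ, if_pos rfl]
      have hmax : maxT matrix imax 0 []
          = matrix.map (fun row => (PySem.List.pyGet? row imax).getD 0) := by
        have := maxTgo_eq matrix imax (matrix.length + 1) 0 [] (by omega) (by omega)
        simpa [maxT] using this
      rw [hmax]
    · rcases hpre with hpre | hpre
      · exact absurd hpre hj
      obtain ⟨hjC, hiR⟩ := hpre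
      by_cases hi : i = (matrix.length : Int)
      · have hcond : (j + 1 = ((matrix.headD []).length : Int) ∨
            (j + 1 < ((matrix.headD []).length : Int) ∧ (0:Int) ≤ (matrix.length : Int))) := by
          omega
        have hfuel : fuelA matrix 0 (j + 1) ≤ f := by
          simp only [fuelA] at hf ⊢
          have h1 : (((matrix.headD []).length : Int) - j).toNat
              = (((matrix.headD []).length : Int) - (j + 1)).toNat + 1 := by omega
          rw [h1, Nat.add_mul, one_mul] at hf
          subst hi
          omega
        rw [auxgo_succ, if_neg hj, if_pos hi]
        subst hi
        unfold aux_alt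
        rw [bb_colend matrix svmax imax j result hjC]
        split_ifs with h
        · rw [ih result j 0 (j + 1) 1 hcond hfuel]; rfl
        · rw [ih svmax imax 0 (j + 1) 1 hcond hfuel]; rfl
      · have hiR' : i < (matrix.length : Int) := by omega
        have hfuel : fuelA matrix (i + 1) j ≤ f := by
          simp only [fuelA] at hf ⊢; omega
        rw [auxgo_succ, if_neg hj, if_neg hi,
          ih svmax imax (i + 1) j (result * cellA matrix i j)
            (Or.inr ⟨hjC, by omega⟩) hfuel]
        unfold aux_alt
        rw [← bb_step matrix svmax imax i j result hiR']

-- ===== VERDICT (by name: the statement is the Claim_ definition above) =====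
theorem aux_spec : Claim_equal_aux := by
  intro matrix svmax imax i j result _ hpre
  unfold Spec_aux aux
  refine auxgo_eq matrix (fuelA matrix i j) svmax imax i j result ?_ le_rfl
  rcases hpre.2.2 with h | h | h
  · exact Or.inl h
  · exact Or.inr ⟨h.1, h.2.2.1⟩
  · exact Or.inr ⟨h.1, le_of_eq h.2.1⟩
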